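-- pv_equiv track=rewrite | github.com/bitalizer/pyflashkit | flashkit/decompile/helpers.py | wrap_for_logical
-- ===== SOURCE A (Python) =====
-- def has_outer_parens(expr: str) -> bool:
--     """Return True if ``expr`` is wrapped in matching outer parens."""
--     if not (expr.startswith("(") and expr.endswith(")")):
--         return False
--     depth = 0
--     for i, ch in enumerate(expr):
--         if ch == "(":
--             depth += 1
--         elif ch == ")":
--             depth -= 1
--         if depth == 0 and i < len(expr) - 1:
--             return False  # First '(' closed before end.
--     return True
--
-- def wrap_for_logical(expr: str, join_op: str) -> str:
--     """Wrap ``expr`` in parens iff it mixes a different logical operator.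
--
--     ``(a == b)`` doesn't need wrapping under ``||`` (== binds tighter).
--     ``(a && b)`` does need wrapping under ``||``.
--     """
--     if has_outer_parens(expr):
--         return expr
--     other_op = "||" if join_op == "&&" else "&&"
--     depth = 0
--     i = 0
--     while i < len(expr) - 1:
--         ch = expr[i]
--         if ch == "(":
--             depth += 1
--         elif ch == ")":
--             depth -= 1
--         elif ch == '"':
--             i += 1
--             while i < len(expr) and expr[i] != '"':
--                 if expr[i] == "\\":
--                     i += 1
--                 i += 1
--         elif depth == 0 and expr[i:i + 2] == other_op:
--             return f"({expr})"
--         i += 1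
--     return expr
-- ===== SOURCE B (Python) =====
-- def has_outer_parens(expr: str) -> bool:
--     """True iff expr is wrapped in matching outer parens: every proper prefix
--     after the first char keeps depth >= 1."""
--     if not (expr.startswith("(") and expr.endswith(")")):
--         return False
--     depth = 0
--     for ch in expr[:-1]:
--         depth += (ch == "(") - (ch == ")")
--         if depth <= 0:
--             return False
--     return True
--
--
-- def wrap_for_logical(expr: str, join_op: str) -> str:
--     """Single-pass state machine (code / in-string / escape) remembering the
--     previous code character; wraps on a depth-0 look-back pair of the other op."""
--     if has_outer_parens(expr):
--         return expr
--     oc = "|" if join_op == "&&" else "&"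
--     CODE, STRING, ESCAPE = 0, 1, 2
--     mode = CODE
--     depth = 0
--     prev = " "  # neutral: never an operator character
--     for ch in expr:
--         if mode == ESCAPE:
--             mode = STRING
--         elif mode == STRING:
--             if ch == '"':
--                 mode = CODE
--             elif ch == "\\":
--                 mode = ESCAPE
--         elif ch == '"':
--             mode = STRING
--             prev = " "
--         elif prev == oc and ch == oc and depth == 0:
--             return f"({expr})"
--         else:
--             if ch == "(":
--                 depth += 1
--             elif ch == ")":
--                 depth -= 1
--             prev = ch
--     return expr
-- ===== Notes on version B (the rewrite author's own statement) =====
-- stated objective: alternative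
-- what changed: A's index-jumping while loop (two-char lookahead slices plus a nested inner while that skips string literals, and a guard loop with an enumerate/early-exit depth-zero test) is replaced by a single-pass three-mode state machine (code / in-string / escape) that remembers the previous code character and fires on a depth-0 look-back pair, with the guard recast as a depth-stays-positive loop over expr[:-1]. Same O(n) asymptotics; …
import Mathlib
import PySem

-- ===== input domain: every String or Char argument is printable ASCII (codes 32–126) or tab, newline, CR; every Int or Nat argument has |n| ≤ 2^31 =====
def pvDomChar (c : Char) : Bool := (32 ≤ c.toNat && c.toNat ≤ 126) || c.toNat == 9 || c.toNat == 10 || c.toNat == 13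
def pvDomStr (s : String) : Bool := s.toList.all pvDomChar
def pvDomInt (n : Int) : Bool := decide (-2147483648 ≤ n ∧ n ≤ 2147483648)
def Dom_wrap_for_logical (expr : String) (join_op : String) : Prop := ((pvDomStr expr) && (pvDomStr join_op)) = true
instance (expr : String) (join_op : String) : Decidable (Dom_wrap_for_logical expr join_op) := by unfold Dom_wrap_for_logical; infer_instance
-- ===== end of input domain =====

-- B replaces A's index-jumping scan (with an inner literal-skip while loop) by a
-- single-pass three-mode state machine remembering the previous code character,
-- and replaces the guard's early-exit depth loop by a dropLast depth-positivity
-- loop; same O(n) cost, different decomposition (return value only).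

-- ===== PORT A =====
-- port of has_outer_parens, A's version (early exit when depth hits 0 before the end)
def hopLoop (l : List Char) (depth : Int) (i : Nat) (n : Nat) : Bool :=
  match l with
  | [] => true
  | c :: r =>
    let d := if c = '(' then depth + 1 else if c = ')' then depth - 1 else depth
    if d = 0 ∧ i < n - 1 then false else hopLoop r d (i + 1) n

def has_outer_parens (expr : String) : Bool :=
  if !(PySem.Str.startswith expr "(" && PySem.Str.endswith expr ")") then false
  else hopLoop expr.toList 0 0 expr.toList.length

-- the inner `while` of A: consume a string literal body, return the suffix after
-- the closing quote (backslash skips the next char; unterminated → empty)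
def skipStr : List Char → List Char
  | [] => []
  | '"' :: r => r
  | '\\' :: [] => []
  | '\\' :: _ :: r => skipStr r
  | _ :: r => skipStr r

theorem skipStr_length_le (s : List Char) : (skipStr s).length ≤ s.length := by
  induction s using skipStr.induct <;> simp [skipStr] <;> omega

-- A's main while loop (needs ≥ 2 remaining chars, i.e. i < len-1).
-- other_op is "||" or "&&", two equal characters, passed as the character oc;
-- expr[i:i+2] == other_op is thus c1 = oc ∧ c2 = oc.
def scanA (oc : Char) : List Char → Int → Bool
  | c1 :: c2 :: rest, depth =>
    if c1 = '(' then scanA oc (c2 :: rest) (depth + 1)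
    else if c1 = ')' then scanA oc (c2 :: rest) (depth - 1)
    else if c1 = '"' then scanA oc (skipStr (c2 :: rest)) depth
    else if depth = 0 ∧ c1 = oc ∧ c2 = oc then true
    else scanA oc (c2 :: rest) depth
  | _, _ => false
  termination_by l _ => l.length
  decreasing_by
  · simp
  · simp
  · have := skipStr_length_le (c2 :: rest); simp at this ⊢; omega
  · simp

def wrap_for_logical (expr : String) (join_op : String) : String :=
  if has_outer_parens expr then expr
  else
    if scanA (if join_op = "&&" then '|' else '&') expr.toList 0 then
      "(" ++ expr ++ ")"
    else expr

-- ===== PORT B =====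
-- B's guard loop: over expr[:-1], depth must stay positive (no early-exit flag var)
def hop2 : List Char → Int → Bool
  | [], _ => true
  | c :: r, depth =>
    let d := depth + (if c = '(' then 1 else 0) - (if c = ')' then 1 else 0)
    if d ≤ 0 then false else hop2 r d

def has_outer_parens_alt (expr : String) : Bool :=
  if !(PySem.Str.startswith expr "(" && PySem.Str.endswith expr ")") then false
  else hop2 expr.toList.dropLast 0

-- B's scan: one char at a time; mode 0 = code, 1 = in string, 2 = after backslash;
-- prev = last code character seen ('  ' filler after a literal / at the start)
def scanAlt (oc : Char) : List Char → Nat → Int → Char → Bool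
  | [], _, _, _ => false
  | ch :: r, mode, depth, prev =>
    if mode = 2 then scanAlt oc r 1 depth prev
    else if mode = 1 then
      if ch = '"' then scanAlt oc r 0 depth prev
      else if ch = '\\' then scanAlt oc r 2 depth prev
      else scanAlt oc r 1 depth prev
    else if ch = '"' then scanAlt oc r 1 depth ' '
    else if prev = oc ∧ ch = oc ∧ depth = 0 then true
    else
      scanAlt oc r 0
        (if ch = '(' then depth + 1 else if ch = ')' then depth - 1 else depth) ch

def wrap_for_logical_alt (expr : String) (join_op : String) : String :=
  if has_outer_parens_alt expr then expr
  else
    if scanAlt (if join_op = "&&" then '|' else '&') expr.toList 0 0 ' ' then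
      "(" ++ expr ++ ")"
    else expr

-- ===== PRECONDITION & SPEC =====
def Spec_wrap_for_logical (expr : String) (join_op : String) (out : String) : Prop := out = wrap_for_logical_alt expr join_op
instance (expr : String) (join_op : String) (out : String) : Decidable (Spec_wrap_for_logical expr join_op out) := by unfold Spec_wrap_for_logical; infer_instance

-- ===== CLAIM (what is proved, stated in full; the proofs are below) =====
def Claim_equal_wrap_for_logical : Prop := ∀ (expr : String) (join_op : String), Dom_wrap_for_logical expr join_op → Spec_wrap_for_logical expr join_op (wrap_for_logical expr join_op)

-- ===== LEMMAS AND PROOFS =====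

-- A's guard loop, recast structurally: the i < n-1 test is "tail nonempty"
def hopRec : List Char → Int → Bool
  | [], _ => true
  | c :: r, depth =>
    let d := if c = '(' then depth + 1 else if c = ')' then depth - 1 else depth
    if d = 0 ∧ r ≠ [] then false else hopRec r d

theorem hopLoop_eq_hopRec :
    ∀ (l : List Char) (d : Int) (i : Nat), hopLoop l d i (i + l.length) = hopRec l d := by
  intro l
  induction l with
  | nil => intro d i; rfl
  | cons c r ih =>
    intro d i
    have hiff : (i < i + (c :: r).length - 1) ↔ r ≠ [] := by
      cases r with
      | nil => simp
      | cons a b =>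
        simp only [List.length_cons, ne_eq, reduceCtorEq, not_false_iff, iff_true]
        omega
    have hn : i + (c :: r).length = i + 1 + r.length := by
      simp [List.length_cons]; omega
    have htail : hopLoop r (if c = '(' then d + 1 else if c = ')' then d - 1 else d)
        (i + 1) (i + (c :: r).length)
        = hopRec r (if c = '(' then d + 1 else if c = ')' then d - 1 else d) := by
      rw [hn]; exact ih _ _
    simp only [hopLoop, hopRec]
    rw [if_congr (and_congr_right fun _ => hiff) rfl htail]

theorem hopRec_eq_hop2 :
    ∀ (l : List Char) (d : Int), 1 ≤ d → hopRec l d = hop2 l.dropLast d := by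
  intro l
  induction l with
  | nil => intro d _; rfl
  | cons c r ih =>
    intro d hd
    have hstep : (d + (if c = '(' then 1 else 0) - (if c = ')' then 1 else 0))
        = (if c = '(' then d + 1 else if c = ')' then d - 1 else d) := by
      by_cases h1 : c = '(' <;> by_cases h2 : c = ')' <;> simp_all
    cases r with
    | nil => simp [hopRec, hop2]
    | cons y t =>
      have hdl : (c :: y :: t).dropLast = c :: (y :: t).dropLast := by simp
      rw [hdl]
      have hL : hopRec (c :: y :: t) d
          = if (if c = '(' then d + 1 else if c = ')' then d - 1 else d) = 0 ∧ (y :: t) ≠ []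
            then false
            else hopRec (y :: t) (if c = '(' then d + 1 else if c = ')' then d - 1 else d) := rfl
      have hR : hop2 (c :: (y :: t).dropLast) d
          = if (d + (if c = '(' then 1 else 0) - (if c = ')' then 1 else 0)) ≤ 0
            then false
            else hop2 (y :: t).dropLast
              (d + (if c = '(' then 1 else 0) - (if c = ')' then 1 else 0)) := rfl
      rw [hL, hR, hstep]
      set e := (if c = '(' then d + 1 else if c = ')' then d - 1 else d) with he
      have hge : (0 : Int) ≤ e := by rw [he]; split_ifs <;> omega
      by_cases hz : e = 0
      · rw [if_pos (⟨hz, by simp⟩ : e = 0 ∧ (y :: t) ≠ []), if_pos (show e ≤ 0 by omega)]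
      · rw [if_neg (fun h : e = 0 ∧ (y :: t) ≠ [] => hz h.1),
            if_neg (show ¬ e ≤ 0 by omega)]
        exact ih e (by omega)

theorem hop_eq (expr : String) : has_outer_parens expr = has_outer_parens_alt expr := by
  unfold has_outer_parens has_outer_parens_alt
  by_cases hg : (PySem.Str.startswith expr "(" && PySem.Str.endswith expr ")") = true
  · rw [hg]
    have hs : ['('] <+: expr.toList :=
      (PySem.Chars.startswith_iff expr.toList ['(']).mp
        (by simpa using (Bool.and_elim_left hg))
    have he : [')'] <:+ expr.toList :=
      (PySem.Chars.endswith_iff expr.toList [')']).mp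
        (by simpa using (Bool.and_elim_right hg))
    obtain ⟨rest, hrest⟩ : ∃ rest, expr.toList = '(' :: rest := by
      obtain ⟨t, ht⟩ := hs; exact ⟨t, ht.symm⟩
    rw [hrest]
    rw [show ('(' :: rest).length = 0 + ('(' :: rest).length by omega, hopLoop_eq_hopRec]
    cases rest with
    | nil =>
      rw [hrest] at he
      exact absurd he (by decide)
    | cons y t =>
      rw [show hopRec ('(' :: y :: t) 0 = hopRec (y :: t) 1 by simp [hopRec],
          show ('(' :: y :: t).dropLast = '(' :: (y :: t).dropLast by simp,
          show hop2 ('(' :: (y :: t).dropLast) 0 = hop2 (y :: t).dropLast 1 by simp [hop2],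
          hopRec_eq_hop2 _ 1 le_rfl]
  · simp only [Bool.not_eq_true] at hg; rw [hg]; rfl

-- the in-string modes of scanAlt consume exactly what A's inner while consumes
theorem scanAlt_string (oc : Char) :
    ∀ (r : List Char) (d : Int) (p : Char),
      scanAlt oc r 1 d p = scanAlt oc (skipStr r) 0 d p := by
  intro r
  induction r using skipStr.induct with
  | case1 => intro d p; rfl
  | case2 r => intro d p; simp [scanAlt, skipStr]
  | case3 => intro d p; simp [scanAlt, skipStr]
  | case4 x r ih => intro d p; simp [scanAlt, skipStr, ih]
  | case5 c r h1 h2 h3 ih =>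
    intro d p
    have hc1 : c ≠ '"' := fun h => h1 h
    have hc2 : c ≠ '\\' := by
      intro h
      cases r with
      | nil => exact h2 h rfl
      | cons y t => exact h3 y t h rfl
    simp [scanAlt, skipStr, hc1, hc2, ih]

-- main bridge: with a safe prev (no pending look-back match), B's state machine
-- computes A's look-ahead scan
theorem scan_eq (oc : Char) (hoc : oc = '&' ∨ oc = '|') :
    ∀ (n : Nat) (l : List Char) (d : Int) (p : Char), l.length ≤ n →
      (p = oc → d = 0 → l.head? ≠ some oc) →
      scanAlt oc l 0 d p = scanA oc l d := by
  have hq : oc ≠ '"' := by rcases hoc with h | h <;> simp [h]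
  have hop : oc ≠ '(' := by rcases hoc with h | h <;> simp [h]
  have hcp : oc ≠ ')' := by rcases hoc with h | h <;> simp [h]
  have hsp : (' ' : Char) ≠ oc := by rcases hoc with h | h <;> simp [h]
  intro n
  induction n with
  | zero =>
    intro l d p hl hp
    match l with
    | [] => simp [scanAlt, scanA]
    | c :: r => simp at hl
  | succ n ih =>
    intro l d p hl hp
    match l with
    | [] => simp [scanAlt, scanA]
    | c :: r =>
      have hlr : r.length ≤ n := by simp at hl; omega
      by_cases h3 : c = '"'
      · subst h3
        rw [show scanAlt oc ('"' :: r) 0 d p = scanAlt oc r 1 d ' ' by simp [scanAlt],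
            scanAlt_string,
            ih (skipStr r) d ' ' (le_trans (skipStr_length_le r) hlr)
              (fun hsp' => absurd hsp' hsp)]
        cases r with
        | nil => simp [skipStr, scanA]
        | cons c2 rest =>
          rw [show scanA oc ('"' :: c2 :: rest) d = scanA oc (skipStr (c2 :: rest)) d by
            simp [scanA]]
      · by_cases h1 : c = '('
        · subst h1
          have e1 : scanAlt oc ('(' :: r) 0 d p = scanAlt oc r 0 (d + 1) '(' := by
            simp [scanAlt, Ne.symm hop]
          cases r with
          | nil => rw [e1]; simp [scanAlt, scanA]
          | cons c2 rest =>
            rw [e1, show scanA oc ('(' :: c2 :: rest) d = scanA oc (c2 :: rest) (d + 1) by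
              simp [scanA]]
            exact ih (c2 :: rest) (d + 1) '(' (by simpa using hlr)
              (fun h => absurd h (Ne.symm hop))
        · by_cases h2 : c = ')'
          · subst h2
            have e1 : scanAlt oc (')' :: r) 0 d p = scanAlt oc r 0 (d - 1) ')' := by
              simp [scanAlt, Ne.symm hcp]
            cases r with
            | nil => rw [e1]; simp [scanAlt, scanA]
            | cons c2 rest =>
              rw [e1, show scanA oc (')' :: c2 :: rest) d = scanA oc (c2 :: rest) (d - 1) by
                simp [scanA]]
              exact ih (c2 :: rest) (d - 1) ')' (by simpa using hlr)
                (fun h => absurd h (Ne.symm hcp))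
          · have hcnd : ¬(p = oc ∧ c = oc ∧ d = 0) := by
              rintro ⟨hp1, hc, hd0⟩
              exact hp hp1 hd0 (by simp [hc])
            have e1 : scanAlt oc (c :: r) 0 d p = scanAlt oc r 0 d c := by
              simp [scanAlt, h1, h2, h3, hcnd]
            cases r with
            | nil => rw [e1]; simp [scanAlt, scanA]
            | cons c2 rest =>
              by_cases h5 : d = 0 ∧ c = oc ∧ c2 = oc
              · have eR : scanA oc (c :: c2 :: rest) d = true := by
                  simp only [scanA]; rw [if_neg h1, if_neg h2, if_neg h3, if_pos h5]
                have eL : scanAlt oc (c2 :: rest) 0 d c = true := by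
                  obtain ⟨hd0, hc, hc2⟩ := h5
                  simp [scanAlt, hc2, hc, hd0, hq]
                rw [e1, eL, eR]
              · have eR : scanA oc (c :: c2 :: rest) d = scanA oc (c2 :: rest) d := by
                  simp only [scanA]; rw [if_neg h1, if_neg h2, if_neg h3, if_neg h5]
                rw [e1, eR]
                exact ih (c2 :: rest) d c (by simpa using hlr)
                  (fun hc hd0 heq => h5 ⟨hd0, hc, by simpa using heq⟩)

-- ===== VERDICT (by name: the statement is the Claim_ definition above) =====
theorem wrap_for_logical_spec : Claim_equal_wrap_for_logical := by
  intro expr join_op _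
  unfold Spec_wrap_for_logical wrap_for_logical wrap_for_logical_alt
  rw [hop_eq]
  by_cases h : has_outer_parens_alt expr = true
  · simp [h]
  · simp only [h, if_false, Bool.false_eq_true]
    rw [scan_eq (if join_op = "&&" then '|' else '&')
        (by by_cases hj : join_op = "&&" <;> simp [hj]) expr.toList.length expr.toList 0 ' '
        le_rfl (by intro hsp; exact absurd hsp.symm (by split_ifs <;> decide))]
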